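-- pv_equiv track=rewrite | github.com/Hybridlo/Metaprog | lab1/util/util.py | check_end_of_keyword
-- ===== SOURCE A (Python) =====
-- def check_end_of_keyword(tokens, curr_token_index, keyword_token):
--     """Check if current token ends keyword line"""
--     if tokens[curr_token_index] != "SEMICOLON":
--         return False
--
--     i = curr_token_index - 1
--
--     while True:
--         if i < 0:
--             return False
--
--         if tokens[i] == "SEMICOLON":
--             return False
--
--         elif tokens[i] == keyword_token:       #found keyword on this line
--             return True
--
--         i -= 1
-- ===== SOURCE B (Python) =====
-- def check_end_of_keyword(tokens, curr_token_index, keyword_token):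
--     """Check if current token ends keyword line"""
--     if tokens[curr_token_index] != "SEMICOLON":
--         return False
--
--     last_semi = max((i for i in range(curr_token_index) if tokens[i] == "SEMICOLON"), default=-1)
--     last_kw = max((i for i in range(curr_token_index) if tokens[i] == keyword_token), default=-1)
--     return last_kw > last_semi
-- ===== Notes on version B (the rewrite author's own statement) =====
-- stated objective: simpler
-- what changed: Replaces A's reversed early-exit while-loop with a non-looping decomposition: compute the last index of SEMICOLON and of keyword_token in the prefix before curr_token_index (default -1) and return last_kw > last_semi.
import Mathlib
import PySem

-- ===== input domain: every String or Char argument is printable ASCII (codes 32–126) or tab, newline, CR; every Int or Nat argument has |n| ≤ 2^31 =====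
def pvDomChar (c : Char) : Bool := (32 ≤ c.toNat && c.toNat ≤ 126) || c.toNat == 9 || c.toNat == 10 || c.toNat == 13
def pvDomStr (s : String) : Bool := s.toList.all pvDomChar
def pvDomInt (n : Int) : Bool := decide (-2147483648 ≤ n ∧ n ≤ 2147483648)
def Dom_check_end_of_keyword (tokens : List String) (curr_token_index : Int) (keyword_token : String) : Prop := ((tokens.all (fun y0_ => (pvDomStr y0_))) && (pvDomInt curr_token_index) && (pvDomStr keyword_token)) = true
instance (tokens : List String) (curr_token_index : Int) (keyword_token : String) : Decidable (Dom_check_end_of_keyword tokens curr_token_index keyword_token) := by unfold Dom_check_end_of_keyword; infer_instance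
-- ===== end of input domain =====

-- B replaces A's reversed early-exit while-loop by computing the last SEMICOLON and last
-- keyword positions in the prefix and comparing them (simpler decomposition, same O(n) cost).
-- ===== PORT A =====
-- A's backward while-loop: scan i = curr-1, curr-2, … until index < 0 (False),
-- a SEMICOLON (False) or the keyword (True).
def ceokLoop (tokens : List String) (keyword_token : String) (i : Int) : Bool :=
  if i < 0 then false
  else if PySem.List.pyGetD tokens i "" == "SEMICOLON" then false
  else if PySem.List.pyGetD tokens i "" == keyword_token then true
  else ceokLoop tokens keyword_token (i - 1)
termination_by (i + 1).toNat
decreasing_by omega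

def check_end_of_keyword (tokens : List String) (curr_token_index : Int) (keyword_token : String) : Bool :=
  if PySem.List.pyGetD tokens curr_token_index "" != "SEMICOLON" then false
  else ceokLoop tokens keyword_token (curr_token_index - 1)

-- ===== PORT B =====
-- last index in tokens[0:b] whose token equals tok, -1 if none
-- (Source B's max((i for i in range(b) if tokens[i] == tok), default=-1))
def lastIdx (tokens : List String) (tok : String) (b : Int) : Int :=
  ((PySem.List.pyRange 0 b 1).filter
      (fun i => PySem.List.pyGetD tokens i "" == tok)).foldl max (-1)

def check_end_of_keyword_alt (tokens : List String) (curr_token_index : Int) (keyword_token : String) : Bool :=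
  if PySem.List.pyGetD tokens curr_token_index "" != "SEMICOLON" then false
  else decide (lastIdx tokens keyword_token curr_token_index >
               lastIdx tokens "SEMICOLON" curr_token_index)

-- ===== PRECONDITION & SPEC =====
-- Pre_: tokens[curr_token_index] must be a valid Python index (else A raises IndexError).
def Pre_check_end_of_keyword (tokens : List String) (curr_token_index : Int) (keyword_token : String) : Prop :=
  PySem.Raise.InRange tokens.length curr_token_index
instance (tokens : List String) (curr_token_index : Int) (keyword_token : String) : Decidable (Pre_check_end_of_keyword tokens curr_token_index keyword_token) := by unfold Pre_check_end_of_keyword; infer_instance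

def pvWitness_check_end_of_keyword : List String × Int × String := (["IF", "SEMICOLON"], 1, "IF")

def Spec_check_end_of_keyword (tokens : List String) (curr_token_index : Int) (keyword_token : String) (out : Bool) : Prop := out = check_end_of_keyword_alt tokens curr_token_index keyword_token
instance (tokens : List String) (curr_token_index : Int) (keyword_token : String) (out : Bool) : Decidable (Spec_check_end_of_keyword tokens curr_token_index keyword_token out) := by unfold Spec_check_end_of_keyword; infer_instance

-- ===== CLAIM (what is proved, stated in full; the proofs are below) =====
def Claim_equal_check_end_of_keyword : Prop := ∀ (tokens : List String) (curr_token_index : Int) (keyword_token : String), Dom_check_end_of_keyword tokens curr_token_index keyword_token → Pre_check_end_of_keyword tokens curr_token_index keyword_token → Spec_check_end_of_keyword tokens curr_token_index keyword_token (check_end_of_keyword tokens curr_token_index keyword_token)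

-- ===== LEMMAS AND PROOFS =====

theorem foldl_max_lt (l : List Int) (init c : Int) (h0 : init < c)
    (h : ∀ x ∈ l, x < c) : l.foldl max init < c := by
  induction l generalizing init with
  | nil => exact h0
  | cons a t ih =>
      simp only [List.foldl_cons]
      exact ih _ (max_lt h0 (h a (by simp))) (fun x hx => h x (by simp [hx]))

theorem lastIdx_lt (tokens : List String) (tok : String) (b : Int) (hb : 0 ≤ b) :
    lastIdx tokens tok b < b := by
  refine foldl_max_lt _ _ _ (by omega) ?_
  intro x hx
  have := (PySem.List.mem_pyRange_one).1 (List.mem_of_mem_filter hx)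
  omega

theorem lastIdx_nonpos (tokens : List String) (tok : String) (b : Int) (hb : b ≤ 0) :
    lastIdx tokens tok b = -1 := by
  simp [lastIdx, PySem.List.pyRange_one_eq_nil hb]

theorem lastIdx_succ (tokens : List String) (tok : String) (n : Nat) :
    lastIdx tokens tok ((n : Int) + 1) =
      if PySem.List.pyGetD tokens (n : Int) "" == tok then (n : Int)
      else lastIdx tokens tok n := by
  have hlt : lastIdx tokens tok n ≤ (n : Int) :=
    le_of_lt (lastIdx_lt tokens tok n (Int.natCast_nonneg n))
  unfold lastIdx at *
  rw [PySem.List.pyRange_one_succ_right (Int.natCast_nonneg n), List.filter_append,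
    List.filter_cons, List.filter_nil]
  by_cases h : (PySem.List.pyGetD tokens (n : Int) "" == tok) = true
  · rw [if_pos h, if_pos h, List.foldl_append, List.foldl_cons, List.foldl_nil]
    exact max_eq_right hlt
  · rw [if_neg h, if_neg h, List.append_nil]

theorem loop_eq (tokens : List String) (keyword_token : String) (n : Nat) :
    ceokLoop tokens keyword_token ((n : Int) - 1) =
      decide (lastIdx tokens keyword_token n > lastIdx tokens "SEMICOLON" n) := by
  induction n with
  | zero =>
      rw [ceokLoop]
      simp [lastIdx_nonpos]
  | succ n ih =>
      have hc : ((n + 1 : Nat) : Int) - 1 = (n : Int) := by push_cast; ring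
      have hc2 : ((n + 1 : Nat) : Int) = (n : Int) + 1 := by push_cast; ring
      rw [hc, hc2, ceokLoop, lastIdx_succ, lastIdx_succ]
      have hn : ¬ ((n : Int) < 0) := by omega
      have hkw := lastIdx_lt tokens keyword_token n (Int.natCast_nonneg n)
      have hsemi := lastIdx_lt tokens "SEMICOLON" n (Int.natCast_nonneg n)
      rw [if_neg hn]
      by_cases h1 : (PySem.List.pyGetD tokens (n : Int) "" == "SEMICOLON") = true
      · rw [if_pos h1, if_pos h1]
        by_cases h2 : (PySem.List.pyGetD tokens (n : Int) "" == keyword_token) = true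
        · rw [if_pos h2]; simp
        · rw [if_neg h2]
          symm
          rw [decide_eq_false_iff_not]
          omega
      · rw [if_neg h1, if_neg h1]
        by_cases h2 : (PySem.List.pyGetD tokens (n : Int) "" == keyword_token) = true
        · rw [if_pos h2, if_pos h2]
          symm
          rw [decide_eq_true_eq]
          omega
        · rw [if_neg h2, if_neg h2]
          exact ih

-- ===== VERDICT (by name: the statement is the Claim_ definition above) =====
theorem check_end_of_keyword_spec : Claim_equal_check_end_of_keyword := by
  intro tokens curr_token_index keyword_token _ _
  unfold Spec_check_end_of_keyword check_end_of_keyword check_end_of_keyword_alt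
  by_cases hg : (PySem.List.pyGetD tokens curr_token_index "" != "SEMICOLON") = true
  · rw [if_pos hg, if_pos hg]
  · rw [if_neg hg, if_neg hg]
    by_cases hc : curr_token_index < 0
    · rw [ceokLoop, if_pos (show curr_token_index - 1 < 0 by omega),
        lastIdx_nonpos tokens keyword_token curr_token_index (le_of_lt hc),
        lastIdx_nonpos tokens "SEMICOLON" curr_token_index (le_of_lt hc)]
      simp
    · have he : curr_token_index = ((curr_token_index.toNat : Nat) : Int) := by omega
      rw [he]
      exact loop_eq tokens keyword_token curr_token_index.toNat
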